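-- pv_equiv track=rewrite | github.com/Ks-Classic/numbers-ai | scripts/base_statistics/02_extreme_cube/02-02_並び型分析/pattern_classifier.py | is_l_shape_bottom_left
-- ===== SOURCE A (Python) =====
-- from typing import List, Optional, Tuple, Dict, Any, Set, Union
--
-- def is_l_shape_bottom_left(positions: List[Tuple[int, int]]) -> bool:
--     """└字型（左下L字）かどうかを判定する
--
--     縦方向が上から下に伸び、横方向が右に伸びるL字。
--     縦方向は2行目→3行目、または3行目→4行目で連続。
--     横方向は同じ行内で連続（右に伸びる、2桁まで）。
--     角は縦方向の下の点と横方向の左端が同じ位置。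
--
--     Args:
--         positions: 当選数字の位置リスト（3つの位置、1-indexed）
--
--     Returns:
--         └字型の場合True
--     """
--     if len(positions) != 3:
--         return False
--
--     # 2つが同じ行にあり、1つが別の行にあるか確認
--     rows = [p[0] for p in positions]
--     row_counts = {}
--     for row in rows:
--         row_counts[row] = row_counts.get(row, 0) + 1
--
--     # 2つが同じ行、1つが別の行
--     if sorted(row_counts.values()) != [1, 2]:
--         return False
--
--     # 同じ行の2つの位置を取得
--     horizontal_positions = [p for p in positions if rows.count(p[0]) == 2]
--     vertical_position = [p for p in positions if rows.count(p[0]) == 1][0]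
--
--     # 横方向の2つが隣接しているか確認（列の差が1）
--     horizontal_sorted = sorted(horizontal_positions, key=lambda p: p[1])
--     if horizontal_sorted[1][1] - horizontal_sorted[0][1] != 1:
--         return False
--
--     # 縦方向が横方向の行の下の行にあるか確認（行の差が1）
--     # └字型の場合: 縦方向が上（小さい行）、横方向が下（大きい行）
--     horizontal_row = horizontal_positions[0][0]
--     vertical_row = vertical_position[0]
--
--     # 縦方向が横方向の上の行にあるか確認（行の差が1）
--     if vertical_row != horizontal_row - 1:
--         return False
--
--     # 角の位置を確認: 縦方向の下の点と横方向の左端が同じ位置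
--     # つまり、vertical_positionの行+1と列が、horizontal_sorted[0]の行と列が同じ
--     corner_row = vertical_row + 1  # 縦方向の下の点の行
--     corner_col = horizontal_sorted[0][1]  # 横方向の左端の列
--
--     # 角の位置が一致するか確認（縦方向の下の点 = 横方向の左端）
--     if corner_row == horizontal_row and corner_col == horizontal_sorted[0][1]:
--         # 縦方向の位置が角の上にあるか確認
--         if vertical_position[0] == corner_row - 1 and vertical_position[1] == corner_col:
--             # 横方向が右に伸びているか確認（左端が角、右端が角+1）
--             if horizontal_sorted[1][1] == corner_col + 1:
--                 return True
--
--     return False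
-- ===== SOURCE B (Python) =====
-- def is_l_shape_bottom_left(positions):
--     """Canonical-shape check: normalize by (min row, min col) and compare with the L template."""
--     if len(positions) != 3:
--         return False
--     min_row = min(r for r, _ in positions)
--     min_col = min(c for _, c in positions)
--     return {(r - min_row, c - min_col) for r, c in positions} == {(0, 0), (1, 0), (1, 1)}
-- ===== Notes on version B (the rewrite author's own statement) =====
-- stated objective: simpler
-- what changed: Replaces the row-count dictionary, horizontal/vertical split, pairwise sort and chain of adjacency/corner checks by normalizing the three points to (min row, min col) offsets and comparing that set with the constant L template {(0,0),(1,0),(1,1)}.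
import Mathlib
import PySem

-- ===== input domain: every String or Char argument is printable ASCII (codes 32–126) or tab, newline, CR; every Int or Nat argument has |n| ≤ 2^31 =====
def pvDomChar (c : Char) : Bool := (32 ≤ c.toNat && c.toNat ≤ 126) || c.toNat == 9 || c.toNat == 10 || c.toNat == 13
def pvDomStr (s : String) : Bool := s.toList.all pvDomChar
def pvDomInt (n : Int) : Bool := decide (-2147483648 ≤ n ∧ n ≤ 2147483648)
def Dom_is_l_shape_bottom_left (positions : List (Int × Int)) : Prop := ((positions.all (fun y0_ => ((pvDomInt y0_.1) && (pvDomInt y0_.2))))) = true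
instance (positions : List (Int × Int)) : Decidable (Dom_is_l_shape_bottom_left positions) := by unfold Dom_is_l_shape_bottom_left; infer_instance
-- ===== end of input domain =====

-- B replaces A's row-count dictionary and chain of adjacency/corner checks by a single
-- canonical-shape comparison (normalize by min row/col, compare with the L template); objective: simpler.

-- ===== PORT A =====
def is_l_shape_bottom_left (positions : List (Int × Int)) : Bool :=
  if positions.length ≠ 3 then false
  else
    let rows := positions.map (fun p => p.1)
    let row_counts : PySem.Dict Int Int :=
      rows.foldl (fun d row => d.insert row (d.getD row 0 + 1)) PySem.Dict.empty
    if PySem.List.sorted row_counts.values (fun x => x) false ≠ [1, 2] then false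
    else
      -- [0] on the vertical list: always succeeds after the guard (totality match only)
      match (positions.filter (fun p => rows.count p.1 == 2)),
            (PySem.List.pyGet? (positions.filter (fun p => rows.count p.1 == 1)) 0) with
      | horizontal_positions, some vertical_position =>
        let horizontal_sorted := PySem.List.sorted horizontal_positions (fun p => p.2) false
        match PySem.List.pyGet? horizontal_sorted 1, PySem.List.pyGet? horizontal_sorted 0,
              PySem.List.pyGet? horizontal_positions 0 with  -- indices in range after the guard (totality match only)
        | some h1, some h0, some hp0 =>
          if h1.2 - h0.2 ≠ 1 then false
          else
            let horizontal_row := hp0.1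
            let vertical_row := vertical_position.1
            if vertical_row ≠ horizontal_row - 1 then false
            else
              let corner_row := vertical_row + 1
              let corner_col := h0.2
              if corner_row == horizontal_row && corner_col == h0.2 then
                if vertical_position.1 == corner_row - 1 && vertical_position.2 == corner_col then
                  if h1.2 == corner_col + 1 then true else false
                else false
              else false
        | _, _, _ => false
      | _, none => false

-- ===== PORT B =====
def is_l_shape_bottom_left_alt (positions : List (Int × Int)) : Bool :=
  if positions.length ≠ 3 then false
  else
    -- min over three elements: always some (Option.elim's false branch is a totality guard only)
    (PySem.List.min? (positions.map (fun p => p.1)) (fun x => x)).elim false (fun min_row =>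
      (PySem.List.min? (positions.map (fun p => p.2)) (fun x => x)).elim false (fun min_col =>
        PySem.Set.equal
          (PySem.Set.ofList (positions.map (fun p => (p.1 - min_row, p.2 - min_col))))
          (PySem.Set.ofList [((0 : Int), (0 : Int)), (1, 0), (1, 1)])))

-- ===== PRECONDITION & SPEC =====
def Spec_is_l_shape_bottom_left (positions : List (Int × Int)) (out : Bool) : Prop := out = is_l_shape_bottom_left_alt positions
instance (positions : List (Int × Int)) (out : Bool) : Decidable (Spec_is_l_shape_bottom_left positions out) := by unfold Spec_is_l_shape_bottom_left; infer_instance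

-- ===== CLAIM (what is proved, stated in full; the proofs are below) =====
def Claim_equal_is_l_shape_bottom_left : Prop := ∀ (positions : List (Int × Int)), Dom_is_l_shape_bottom_left positions → Spec_is_l_shape_bottom_left positions (is_l_shape_bottom_left positions)

-- ===== LEMMAS AND PROOFS =====

set_option maxHeartbeats 4000000 in
theorem key_lemma (a b c : Int × Int) :
    is_l_shape_bottom_left [a, b, c] = is_l_shape_bottom_left_alt [a, b, c] := by
  obtain ⟨r1, c1⟩ := a
  obtain ⟨r2, c2⟩ := b
  obtain ⟨r3, c3⟩ := c
  by_cases h12 : r1 = r2 <;> by_cases h13 : r1 = r3 <;> by_cases h23 : r2 = r3 <;>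
    try (exfalso; omega)
  · simp only [is_l_shape_bottom_left, is_l_shape_bottom_left_alt, List.map, List.length]
    rw [PySem.Dict.foldl_insert_getD_add_one_eq_counter]
    simp [PySem.Dict.values, PySem.Dict.items_counter, PySem.Set.ofList, PySem.Set.add,
      PySem.Set.contains, PySem.Set.equal, PySem.Set.issubset, PySem.Set.empty,
      PySem.List.sorted, PySem.List.insertBy, PySem.List.pyGet?, PySem.List.pyIdx?, PySem.List.min?, Option.elim,
      List.count_cons, h12, h13, h23]
    try (split_ifs <;> simp_all [Prod.ext_iff] <;> try omega)
    all_goals ((try split_ifs) <;> (try rw [Bool.eq_iff_iff]) <;>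
      (try simp only [List.all_cons, List.all_nil, List.mem_cons, List.not_mem_nil,
        Prod.mk.injEq, Bool.and_eq_true, Bool.or_eq_true, decide_eq_true_eq, Bool.false_eq_true,
        Bool.true_eq_false, iff_false, iff_true, or_false, false_or, and_true, true_and]) <;> (try omega))
    all_goals ((try split_ifs) <;> (try rw [Bool.eq_iff_iff]) <;>
      (try simp only [List.all_cons, List.all_nil, List.mem_cons, List.not_mem_nil,
        Prod.mk.injEq, Bool.and_eq_true, Bool.or_eq_true, decide_eq_true_eq, Bool.false_eq_true,
        Bool.true_eq_false, iff_false, iff_true, or_false, false_or, and_true, true_and]) <;> (try omega))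
  · simp only [is_l_shape_bottom_left, is_l_shape_bottom_left_alt, List.map, List.length]
    rw [PySem.Dict.foldl_insert_getD_add_one_eq_counter]
    simp [PySem.Dict.values, PySem.Dict.items_counter, PySem.Set.ofList, PySem.Set.add,
      PySem.Set.contains, PySem.Set.equal, PySem.Set.issubset, PySem.Set.empty,
      PySem.List.sorted, PySem.List.insertBy, PySem.List.pyGet?, PySem.List.pyIdx?, PySem.List.min?, Option.elim,
      List.count_cons, h12, h13, h23, Ne.symm h13, Ne.symm h23]
    try (split_ifs <;> simp_all [Prod.ext_iff] <;> try omega)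
    all_goals ((try split_ifs) <;> (try rw [Bool.eq_iff_iff]) <;>
      (try simp only [List.all_cons, List.all_nil, List.mem_cons, List.not_mem_nil,
        Prod.mk.injEq, Bool.and_eq_true, Bool.or_eq_true, decide_eq_true_eq, Bool.false_eq_true,
        Bool.true_eq_false, iff_false, iff_true, or_false, false_or, and_true, true_and]) <;> (try omega))
    all_goals ((try split_ifs) <;> (try rw [Bool.eq_iff_iff]) <;>
      (try simp only [List.all_cons, List.all_nil, List.mem_cons, List.not_mem_nil,
        Prod.mk.injEq, Bool.and_eq_true, Bool.or_eq_true, decide_eq_true_eq, Bool.false_eq_true,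
        Bool.true_eq_false, iff_false, iff_true, or_false, false_or, and_true, true_and]) <;> (try omega))
  · simp only [is_l_shape_bottom_left, is_l_shape_bottom_left_alt, List.map, List.length]
    rw [PySem.Dict.foldl_insert_getD_add_one_eq_counter]
    simp [PySem.Dict.values, PySem.Dict.items_counter, PySem.Set.ofList, PySem.Set.add,
      PySem.Set.contains, PySem.Set.equal, PySem.Set.issubset, PySem.Set.empty,
      PySem.List.sorted, PySem.List.insertBy, PySem.List.pyGet?, PySem.List.pyIdx?, PySem.List.min?, Option.elim,
      List.count_cons, h13, h12, h23, Ne.symm h12, Ne.symm h23]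
    try (split_ifs <;> simp_all [Prod.ext_iff] <;> try omega)
    all_goals ((try split_ifs) <;> (try rw [Bool.eq_iff_iff]) <;>
      (try simp only [List.all_cons, List.all_nil, List.mem_cons, List.not_mem_nil,
        Prod.mk.injEq, Bool.and_eq_true, Bool.or_eq_true, decide_eq_true_eq, Bool.false_eq_true,
        Bool.true_eq_false, iff_false, iff_true, or_false, false_or, and_true, true_and]) <;> (try omega))
    all_goals ((try split_ifs) <;> (try rw [Bool.eq_iff_iff]) <;>
      (try simp only [List.all_cons, List.all_nil, List.mem_cons, List.not_mem_nil,
        Prod.mk.injEq, Bool.and_eq_true, Bool.or_eq_true, decide_eq_true_eq, Bool.false_eq_true,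
        Bool.true_eq_false, iff_false, iff_true, or_false, false_or, and_true, true_and]) <;> (try omega))
  · simp only [is_l_shape_bottom_left, is_l_shape_bottom_left_alt, List.map, List.length]
    rw [PySem.Dict.foldl_insert_getD_add_one_eq_counter]
    simp [PySem.Dict.values, PySem.Dict.items_counter, PySem.Set.ofList, PySem.Set.add,
      PySem.Set.contains, PySem.Set.equal, PySem.Set.issubset, PySem.Set.empty,
      PySem.List.sorted, PySem.List.insertBy, PySem.List.pyGet?, PySem.List.pyIdx?, PySem.List.min?, Option.elim,
      List.count_cons, h23, h12, h13, Ne.symm h12, Ne.symm h13]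
    try (split_ifs <;> simp_all [Prod.ext_iff] <;> try omega)
    all_goals ((try split_ifs) <;> (try rw [Bool.eq_iff_iff]) <;>
      (try simp only [List.all_cons, List.all_nil, List.mem_cons, List.not_mem_nil,
        Prod.mk.injEq, Bool.and_eq_true, Bool.or_eq_true, decide_eq_true_eq, Bool.false_eq_true,
        Bool.true_eq_false, iff_false, iff_true, or_false, false_or, and_true, true_and]) <;> (try omega))
    all_goals ((try split_ifs) <;> (try rw [Bool.eq_iff_iff]) <;>
      (try simp only [List.all_cons, List.all_nil, List.mem_cons, List.not_mem_nil,
        Prod.mk.injEq, Bool.and_eq_true, Bool.or_eq_true, decide_eq_true_eq, Bool.false_eq_true,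
        Bool.true_eq_false, iff_false, iff_true, or_false, false_or, and_true, true_and]) <;> (try omega))
  · simp only [is_l_shape_bottom_left, is_l_shape_bottom_left_alt, List.map, List.length]
    rw [PySem.Dict.foldl_insert_getD_add_one_eq_counter]
    simp [PySem.Dict.values, PySem.Dict.items_counter, PySem.Set.ofList, PySem.Set.add,
      PySem.Set.contains, PySem.Set.equal, PySem.Set.issubset, PySem.Set.empty,
      PySem.List.sorted, PySem.List.insertBy, PySem.List.pyGet?, PySem.List.pyIdx?, PySem.List.min?, Option.elim,
      List.count_cons, h12, h13, h23, Ne.symm h12, Ne.symm h13, Ne.symm h23]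
    try (split_ifs <;> simp_all [Prod.ext_iff] <;> try omega)
    all_goals ((try split_ifs) <;> (try rw [Bool.eq_iff_iff]) <;>
      (try simp only [List.all_cons, List.all_nil, List.mem_cons, List.not_mem_nil,
        Prod.mk.injEq, Bool.and_eq_true, Bool.or_eq_true, decide_eq_true_eq, Bool.false_eq_true,
        Bool.true_eq_false, iff_false, iff_true, or_false, false_or, and_true, true_and]) <;> (try omega))
    all_goals ((try split_ifs) <;> (try rw [Bool.eq_iff_iff]) <;>
      (try simp only [List.all_cons, List.all_nil, List.mem_cons, List.not_mem_nil,
        Prod.mk.injEq, Bool.and_eq_true, Bool.or_eq_true, decide_eq_true_eq, Bool.false_eq_true,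
        Bool.true_eq_false, iff_false, iff_true, or_false, false_or, and_true, true_and]) <;> (try omega))

-- ===== VERDICT (by name: the statement is the Claim_ definition above) =====
theorem is_l_shape_bottom_left_spec : Claim_equal_is_l_shape_bottom_left := by
  intro positions _
  unfold Spec_is_l_shape_bottom_left
  match positions with
  | [] => rfl
  | [_] => rfl
  | [_, _] => rfl
  | [a, b, c] => exact key_lemma a b c
  | _ :: _ :: _ :: _ :: _ =>
    simp [is_l_shape_bottom_left, is_l_shape_bottom_left_alt]
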